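-- pv_equiv track=rewrite | github.com/DmitryGubich/tasks | tasks/2025/03_2025/21/robot_directions.py | dfs
-- ===== SOURCE A (Python) =====
-- def dfs(grid, x, y, steps_left, visited):
--     if steps_left < 0:
--         return 0  # Out of steps
--     if grid[x][y] == "C":
--         return 1  # Reached a camp
--
--     visited[x][y] = True
--     count = 0
--     directions = [(0, 1), (0, -1), (1, 0), (-1, 0)]  # Right, Left, Down, Up
--
--     for dx, dy in directions:
--         new_x, new_y = x + dx, y + dy
--         if is_valid(grid, new_x, new_y, visited):
--             count += dfs(grid, new_x, new_y, steps_left - 1, visited)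
--
--     visited[x][y] = False  # Backtrack
--     return count
--
-- def is_valid(grid, x, y, visited):
--     rows, cols = len(grid), len(grid[0])
--     return 0 <= x < rows and 0 <= y < cols and not visited[x][y] and grid[x][y] != "X"
-- ===== SOURCE B (Python) =====
-- def dfs(grid, x, y, steps_left, visited):
--     # Iterative re-implementation: explicit stack of small-step frames
--     # ("visit" = expand a cell, "enter" = pending validity-checked child,
--     # "exit" = unmark on backtrack).  Same traversal order and the same
--     # in-place marking/unmarking of `visited` as the recursive version.
--     total = 0
--     stack = [("visit", x, y, steps_left)]
--     while stack:
--         tag, fx, fy, s = stack.pop()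
--         if tag == "exit":
--             visited[fx][fy] = False
--         elif tag == "enter":
--             if is_valid(grid, fx, fy, visited):
--                 stack.append(("visit", fx, fy, s))
--         else:  # "visit"
--             if s < 0:
--                 continue
--             if grid[fx][fy] == "C":
--                 total += 1
--                 continue
--             visited[fx][fy] = True
--             stack.append(("exit", fx, fy, 0))
--             # push children in reverse so they are expanded Right, Left, Down, Up
--             for dx, dy in ((-1, 0), (1, 0), (0, -1), (0, 1)):
--                 stack.append(("enter", fx + dx, fy + dy, s - 1))
--     return total
--
--
-- def is_valid(grid, x, y, visited):
--     rows, cols = len(grid), len(grid[0])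
--     return 0 <= x < rows and 0 <= y < cols and not visited[x][y] and grid[x][y] != "X"
-- ===== Notes on version B (the rewrite author's own statement) =====
-- stated objective: alternative
-- what changed: The recursive backtracking DFS is replaced by an iterative small-step machine: an explicit stack of visit/enter/exit frames drives the same traversal (same direction order, same mark-on-expand / unmark-on-backtrack discipline) with an accumulator for the count, eliminating recursion entirely.
-- outside the precondition, e.g. on dfs([['X', 'X'], ['a']], 0, 0, 0, [[False, False], [False]]): A returns 0, B returns 0
import Mathlib
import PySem

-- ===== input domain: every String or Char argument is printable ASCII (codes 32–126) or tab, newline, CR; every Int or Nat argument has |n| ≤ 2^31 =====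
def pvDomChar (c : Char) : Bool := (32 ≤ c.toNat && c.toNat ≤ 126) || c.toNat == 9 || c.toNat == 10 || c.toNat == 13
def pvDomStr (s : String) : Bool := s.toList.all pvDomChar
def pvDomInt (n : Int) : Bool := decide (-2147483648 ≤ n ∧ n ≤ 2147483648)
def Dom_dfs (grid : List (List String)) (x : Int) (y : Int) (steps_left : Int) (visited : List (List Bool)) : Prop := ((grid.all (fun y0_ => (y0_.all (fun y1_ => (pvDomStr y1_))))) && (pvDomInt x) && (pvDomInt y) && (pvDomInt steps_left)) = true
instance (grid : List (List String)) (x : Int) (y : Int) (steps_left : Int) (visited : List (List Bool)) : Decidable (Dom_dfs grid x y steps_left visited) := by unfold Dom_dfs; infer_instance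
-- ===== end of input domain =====

-- B replaces A's recursion by an explicit small-step stack machine (same traversal
-- order, same marking discipline): objective 'alternative', no speed claim.
-- A mutates `visited` in place (mark/unmark, net effect: the start cell is set False);
-- B performs the same mutation in Python; the Lean claim is about the RETURN value.

-- ===== PORT A =====
-- shared primitive helpers (exact Python semantics via PySem; out-of-range reads
-- default — those inputs raise in Python and are excluded by Pre_dfs)
def getCell (grid : List (List String)) (x y : Int) : String :=
  PySem.List.pyGetD (PySem.List.pyGetD grid x []) y ""

def getVis (visited : List (List Bool)) (x y : Int) : Bool :=
  PySem.List.pyGetD (PySem.List.pyGetD visited x []) y false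

-- visited[x][y] = b  (Python negative-index wrap; no-op where Python would raise,
-- excluded by Pre_dfs)
def setVis (visited : List (List Bool)) (x y : Int) (b : Bool) : List (List Bool) :=
  PySem.List.pySetD visited x (PySem.List.pySetD (PySem.List.pyGetD visited x []) y b)

-- port of is_valid, step for step
def isValid (grid : List (List String)) (x y : Int) (visited : List (List Bool)) : Bool :=
  let rows : Int := grid.length
  let cols : Int := (PySem.List.pyGetD grid 0 []).length
  decide (0 ≤ x) && decide (x < rows) && decide (0 ≤ y) && decide (y < cols)
    && !(getVis visited x y) && decide (getCell grid x y ≠ "X")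

-- the recursive dfs, with the mutated `visited` threaded as part of the result;
-- the for-loop over the 4 literal directions is unrolled (same order: R, L, D, U),
-- each step = `if is_valid: count += dfs(...)` on the threaded (count, visited) state
-- termination lemma for the recursive port (cited by name in decreasing_by)
lemma pvDecA (s : Int) (h : ¬ s < 0) : (s - 1 + 1).toNat < (s + 1).toNat := by omega

def childStep (grid : List (List String)) (nx ny _s' : Int)
    (rec : List (List Bool) → Int × List (List Bool))
    (st : Int × List (List Bool)) : Int × List (List Bool) :=
  if isValid grid nx ny st.2 then
    let r := rec st.2
    (st.1 + r.1, r.2)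
  else st

def dfsA (grid : List (List String)) (x y steps_left : Int) (visited : List (List Bool)) :
    Int × List (List Bool) :=
  if steps_left < 0 then (0, visited)
  else if getCell grid x y = "C" then (1, visited)
  else
    let v1 := setVis visited x y true
    let st0 : Int × List (List Bool) := (0, v1)
    let st1 := childStep grid x (y + 1) (steps_left - 1) (dfsA grid x (y + 1) (steps_left - 1)) st0
    let st2 := childStep grid x (y - 1) (steps_left - 1) (dfsA grid x (y - 1) (steps_left - 1)) st1
    let st3 := childStep grid (x + 1) y (steps_left - 1) (dfsA grid (x + 1) y (steps_left - 1)) st2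
    let st4 := childStep grid (x - 1) y (steps_left - 1) (dfsA grid (x - 1) y (steps_left - 1)) st3
    (st4.1, setVis st4.2 x y false)
termination_by (steps_left + 1).toNat
decreasing_by all_goals exact pvDecA steps_left (by assumption)

def dfs (grid : List (List String)) (x : Int) (y : Int) (steps_left : Int) (visited : List (List Bool)) : Int :=
  (dfsA grid x y steps_left visited).1

-- ===== PORT B =====
-- the three frame kinds of Source B's stack: ("visit",x,y,s), ("enter",x,y,s), ("exit",x,y)
inductive PvFrame where
  | visit : Int → Int → Int → PvFrame
  | enter : Int → Int → Int → PvFrame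
  | exit_ : Int → Int → PvFrame
deriving DecidableEq, Repr

-- termination measure for the while loop: every iteration strictly decreases it
def pvFrameW : PvFrame → Nat
  | PvFrame.visit _ _ s => 10 ^ (s + 1).toNat
  | PvFrame.enter _ _ s => 10 ^ (s + 1).toNat + 1
  | PvFrame.exit_ _ _ => 1

def pvStackW (st : List PvFrame) : Nat := (st.map pvFrameW).sum

-- termination lemmas for the loop (cited by name in decreasing_by)
lemma pvWpos (s : Int) : 1 ≤ 10 ^ (s + 1).toNat := Nat.one_le_pow _ _ (by omega)

lemma pvDecExit (fx fy : Int) (rest : List PvFrame) :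
    pvStackW rest < pvStackW (PvFrame.exit_ fx fy :: rest) := by
  simp [pvStackW, pvFrameW]

lemma pvDecEnterVisit (fx fy s : Int) (rest : List PvFrame) :
    pvStackW (PvFrame.visit fx fy s :: rest) < pvStackW (PvFrame.enter fx fy s :: rest) := by
  simp [pvStackW, pvFrameW]

lemma pvDecEnterSkip (fx fy s : Int) (rest : List PvFrame) :
    pvStackW rest < pvStackW (PvFrame.enter fx fy s :: rest) := by
  simp only [pvStackW, pvFrameW, List.map_cons, List.sum_cons]
  have := pvWpos s
  omega

lemma pvDecVisitPop (fx fy s : Int) (rest : List PvFrame) :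
    pvStackW rest < pvStackW (PvFrame.visit fx fy s :: rest) := by
  simp only [pvStackW, pvFrameW, List.map_cons, List.sum_cons]
  have := pvWpos s
  omega

lemma pvDecVisitPush (fx fy s : Int) (rest : List PvFrame) (h : ¬ s < 0) :
    pvStackW
        (PvFrame.enter fx (fy + 1) (s - 1) :: PvFrame.enter fx (fy - 1) (s - 1) ::
          PvFrame.enter (fx + 1) fy (s - 1) :: PvFrame.enter (fx - 1) fy (s - 1) ::
          PvFrame.exit_ fx fy :: rest) <
      pvStackW (PvFrame.visit fx fy s :: rest) := by
  simp only [pvStackW, pvFrameW, List.map_cons, List.sum_cons]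
  have h1 : (s + 1).toNat = s.toNat + 1 := by omega
  have h2 : (s - 1 + 1).toNat = s.toNat := by omega
  rw [h1, h2]
  have hp : 1 ≤ 10 ^ s.toNat := Nat.one_le_pow _ _ (by omega)
  omega

-- the while loop of Source B: state = (stack, visited, total); head of the list = top
def runAlt (grid : List (List String)) :
    List PvFrame → List (List Bool) → Int → Int
  | [], _, total => total
  | PvFrame.exit_ fx fy :: rest, v, total =>
      runAlt grid rest (setVis v fx fy false) total
  | PvFrame.enter fx fy s :: rest, v, total =>
      if isValid grid fx fy v then runAlt grid (PvFrame.visit fx fy s :: rest) v total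
      else runAlt grid rest v total
  | PvFrame.visit fx fy s :: rest, v, total =>
      if s < 0 then runAlt grid rest v total
      else if getCell grid fx fy = "C" then runAlt grid rest v (total + 1)
      else
        runAlt grid
          (PvFrame.enter fx (fy + 1) (s - 1) :: PvFrame.enter fx (fy - 1) (s - 1) ::
            PvFrame.enter (fx + 1) fy (s - 1) :: PvFrame.enter (fx - 1) fy (s - 1) ::
            PvFrame.exit_ fx fy :: rest)
          (setVis v fx fy true) total
termination_by st _ _ => pvStackW st
decreasing_by
  all_goals first
    | exact pvDecExit _ _ _
    | exact pvDecEnterVisit _ _ _ _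
    | exact pvDecEnterSkip _ _ _ _
    | exact pvDecVisitPush _ _ _ _ (by assumption)
    | exact pvDecVisitPop _ _ _ _

def dfs_alt (grid : List (List String)) (x : Int) (y : Int) (steps_left : Int) (visited : List (List Bool)) : Int :=
  runAlt grid [PvFrame.visit x y steps_left] visited 0

-- ===== PRECONDITION & SPEC =====
-- Pre_dfs excludes exactly the inputs on which the Python raises IndexError:
-- an out-of-range start cell, or a ragged grid / a `visited` whose shape differs
-- from the grid's (reachable short rows raise); the trivially-returning cases
-- (steps_left < 0, or the start cell reads "C") are kept regardless of shape.
-- This is slightly narrower than A's raising set (a ragged portion the walk never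
-- reaches does not actually raise) — raggedness that raises cannot be stated in
-- closed form without simulating the walk.
def Pre_dfs (grid : List (List String)) (x : Int) (y : Int) (steps_left : Int) (visited : List (List Bool)) : Prop :=
  steps_left < 0 ∨
  ((PySem.List.pyGet? grid x).bind (fun row => PySem.List.pyGet? row y) = some "C") ∨
  (0 < grid.length ∧
   (∀ r ∈ grid, r.length = (grid.headD []).length) ∧
   0 < (grid.headD []).length ∧
   visited.length = grid.length ∧
   (∀ r ∈ visited, r.length = (grid.headD []).length) ∧
   -(grid.length : Int) ≤ x ∧ x < grid.length ∧
   -((grid.headD []).length : Int) ≤ y ∧ y < (grid.headD []).length)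

instance (grid : List (List String)) (x : Int) (y : Int) (steps_left : Int) (visited : List (List Bool)) : Decidable (Pre_dfs grid x y steps_left visited) := by unfold Pre_dfs; infer_instance

def pvWitness_dfs : List (List String) × Int × Int × Int × List (List Bool) :=
  ([[".", "C"], ["X", "."]], 0, 0, 3, [[false, false], [false, false]])

def Spec_dfs (grid : List (List String)) (x : Int) (y : Int) (steps_left : Int) (visited : List (List Bool)) (out : Int) : Prop := out = dfs_alt grid x y steps_left visited
instance (grid : List (List String)) (x : Int) (y : Int) (steps_left : Int) (visited : List (List Bool)) (out : Int) : Decidable (Spec_dfs grid x y steps_left visited out) := by unfold Spec_dfs; infer_instance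

-- ===== CLAIM (what is proved, stated in full; the proofs are below) =====
def Claim_equal_dfs : Prop := ∀ (grid : List (List String)) (x : Int) (y : Int) (steps_left : Int) (visited : List (List Bool)), Dom_dfs grid x y steps_left visited → Pre_dfs grid x y steps_left visited → Spec_dfs grid x y steps_left visited (dfs grid x y steps_left visited)

-- ===== LEMMAS AND PROOFS =====

-- simulation: one validity-checked child frame behaves like one childStep of dfsA,
-- given the simulation hypothesis for the child's budget
lemma runAlt_enter (grid : List (List String)) (nx ny s' : Int)
    (hIH : ∀ (v : List (List Bool)) (rest : List PvFrame) (total : Int),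
      runAlt grid (PvFrame.visit nx ny s' :: rest) v total =
        runAlt grid rest (dfsA grid nx ny s' v).2 (total + (dfsA grid nx ny s' v).1))
    (st : Int × List (List Bool)) (rest : List PvFrame) (t total : Int)
    (ht : t = total + st.1) :
    runAlt grid (PvFrame.enter nx ny s' :: rest) st.2 t =
      runAlt grid rest (childStep grid nx ny s' (dfsA grid nx ny s') st).2
        (total + (childStep grid nx ny s' (dfsA grid nx ny s') st).1) := by
  subst ht
  rw [runAlt]
  unfold childStep
  by_cases h : isValid grid nx ny st.2
  · simp only [h, if_true, hIH]
    ring_nf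
  · simp [h]

-- dfsA on the expanding branch, written as the explicit chain of the four child steps
lemma dfsA_expand (grid : List (List String)) (x y s : Int) (v : List (List Bool))
    (hneg : ¬ s < 0) (hC : ¬ getCell grid x y = "C") :
    dfsA grid x y s v =
      ((childStep grid (x - 1) y (s - 1) (dfsA grid (x - 1) y (s - 1))
          (childStep grid (x + 1) y (s - 1) (dfsA grid (x + 1) y (s - 1))
            (childStep grid x (y - 1) (s - 1) (dfsA grid x (y - 1) (s - 1))
              (childStep grid x (y + 1) (s - 1) (dfsA grid x (y + 1) (s - 1))
                (0, setVis v x y true))))).1,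
       setVis
         (childStep grid (x - 1) y (s - 1) (dfsA grid (x - 1) y (s - 1))
           (childStep grid (x + 1) y (s - 1) (dfsA grid (x + 1) y (s - 1))
             (childStep grid x (y - 1) (s - 1) (dfsA grid x (y - 1) (s - 1))
               (childStep grid x (y + 1) (s - 1) (dfsA grid x (y + 1) (s - 1))
                 (0, setVis v x y true))))).2 x y false) := by
  rw [dfsA]
  simp [hneg, hC]

-- main simulation lemma: a visit frame contributes exactly dfsA's count and
-- leaves exactly dfsA's threaded visited
lemma runAlt_visit (grid : List (List String)) :
    ∀ (n : Nat) (s : Int), (s + 1).toNat ≤ n →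
      ∀ (x y : Int) (v : List (List Bool)) (rest : List PvFrame) (total : Int),
        runAlt grid (PvFrame.visit x y s :: rest) v total =
          runAlt grid rest (dfsA grid x y s v).2 (total + (dfsA grid x y s v).1) := by
  intro n
  induction n with
  | zero =>
    intro s hs x y v rest total
    have hneg : s < 0 := by omega
    rw [runAlt, dfsA]
    simp [hneg]
  | succ n ih =>
    intro s hs x y v rest total
    by_cases hneg : s < 0
    · rw [runAlt, dfsA]; simp [hneg]
    · by_cases hC : getCell grid x y = "C"
      · rw [runAlt, dfsA]; simp [hneg, hC]
      · have hs' : (s - 1 + 1).toNat ≤ n := by omega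
        have A1 := runAlt_enter grid x (y + 1) (s - 1)
          (fun v rest total => ih (s - 1) hs' x (y + 1) v rest total)
        have A2 := runAlt_enter grid x (y - 1) (s - 1)
          (fun v rest total => ih (s - 1) hs' x (y - 1) v rest total)
        have A3 := runAlt_enter grid (x + 1) y (s - 1)
          (fun v rest total => ih (s - 1) hs' (x + 1) y v rest total)
        have A4 := runAlt_enter grid (x - 1) y (s - 1)
          (fun v rest total => ih (s - 1) hs' (x - 1) y v rest total)
        rw [runAlt]
        simp only [hneg, hC, if_false]
        rw [dfsA_expand grid x y s v hneg hC]
        exact (A1 (0, setVis v x y true) _ total total (by simp)).trans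
          ((A2 _ _ _ total rfl).trans
            ((A3 _ _ _ total rfl).trans
              ((A4 _ _ _ total rfl).trans (by rw [runAlt]))))

-- ===== VERDICT (by name: the statement is the Claim_ definition above) =====
theorem dfs_spec : Claim_equal_dfs := by
  intro grid x y steps_left visited _ _
  unfold Spec_dfs dfs dfs_alt
  rw [runAlt_visit grid (steps_left + 1).toNat steps_left le_rfl, runAlt]
  omega
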